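-- pv_equiv track=rewrite | github.com/Nikhilsunchu1107/capstone | graph_rag/scripts/generate_eval_samples.py | _allocation
-- ===== SOURCE A (Python) =====
-- def _allocation(total: int, configs: list[str]) -> dict[str, int]:
--     """Allocate a total sample size as evenly as possible across configs."""
--     if total <= 0:
--         msg = "Total sample size must be greater than zero."
--         raise ValueError(msg)
--
--     if not configs:
--         msg = "At least one config is required."
--         raise ValueError(msg)
--
--     base = total // len(configs)
--     remainder = total % len(configs)
--     return {
--         config_name: base + (1 if index < remainder else 0)
--         for index, config_name in enumerate(configs)
--     }
-- ===== SOURCE B (Python) =====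
-- def _allocation(total: int, configs: list[str]) -> dict[str, int]:
--     """Allocate a total sample size as evenly as possible across configs."""
--     if total <= 0:
--         msg = "Total sample size must be greater than zero."
--         raise ValueError(msg)
--
--     if not configs:
--         msg = "At least one config is required."
--         raise ValueError(msg)
--
--     result = {}
--     remaining = total
--     left = len(configs)
--     for name in configs:
--         share = -(-remaining // left)  # integer ceiling of remaining / left
--         result[name] = share
--         remaining -= share
--         left -= 1
--     return result
-- ===== Notes on version B (the rewrite author's own statement) =====
-- stated objective: alternative
-- what changed: Replaces the base//remainder arithmetic plus enumerate-with-index comprehension by a single greedy pass that keeps remaining and configs-left counters and gives each config the integer ceiling of remaining/left.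
import Mathlib
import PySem

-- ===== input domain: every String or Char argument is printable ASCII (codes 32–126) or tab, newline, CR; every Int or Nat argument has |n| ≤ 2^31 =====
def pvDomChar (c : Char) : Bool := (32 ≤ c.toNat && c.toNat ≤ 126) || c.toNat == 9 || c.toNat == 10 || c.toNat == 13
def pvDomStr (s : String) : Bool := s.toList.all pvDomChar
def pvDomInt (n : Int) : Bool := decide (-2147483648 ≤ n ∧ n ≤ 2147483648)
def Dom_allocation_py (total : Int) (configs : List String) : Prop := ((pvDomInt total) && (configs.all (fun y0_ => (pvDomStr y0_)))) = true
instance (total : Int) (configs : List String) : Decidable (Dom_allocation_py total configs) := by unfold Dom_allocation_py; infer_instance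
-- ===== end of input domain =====

-- B replaces A's base//remainder + enumerate comprehension by a greedy single pass
-- giving each config the integer ceiling of remaining/configs_left (alternative decomposition, same cost).


-- ===== PORT A =====
-- literal port of A: base = total // len, remainder = total % len,
-- dict comprehension over enumerate(configs)
def allocation_py (total : Int) (configs : List String) : List (String × Int) :=
  let base := PySem.Int.floordiv total (configs.length : Int)
  let rem := PySem.Int.mod total (configs.length : Int)
  ((PySem.List.enumerate configs).foldl
    (fun d p => d.insert p.2 (base + (if p.1 < rem then 1 else 0)))
    (PySem.Dict.empty : PySem.Dict String Int)).items

-- ===== PORT B =====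
-- B's loop: remaining/left counters, share = -(-remaining // left)
def allocBLoop (remaining left : Int) (names : List String)
    (d : PySem.Dict String Int) : PySem.Dict String Int :=
  match names with
  | [] => d
  | n :: rest =>
    let share := -(PySem.Int.floordiv (-remaining) left)
    allocBLoop (remaining - share) (left - 1) rest (d.insert n share)

def allocation_py_alt (total : Int) (configs : List String) : List (String × Int) :=
  (allocBLoop total (configs.length : Int) configs PySem.Dict.empty).items

-- ===== PRECONDITION & SPEC =====
-- A raises ValueError when total <= 0 or configs is empty; Pre_ excludes exactly those.
def Pre_allocation_py (total : Int) (configs : List String) : Prop :=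
  0 < total ∧ configs ≠ []
instance (total : Int) (configs : List String) : Decidable (Pre_allocation_py total configs) := by unfold Pre_allocation_py; infer_instance
def pvWitness_allocation_py : Int × List String := (5, ["a", "b"])

def Spec_allocation_py (total : Int) (configs : List String) (out : List (String × Int)) : Prop := out = allocation_py_alt total configs
instance (total : Int) (configs : List String) (out : List (String × Int)) : Decidable (Spec_allocation_py total configs out) := by unfold Spec_allocation_py; infer_instance

-- ===== CLAIM (what is proved, stated in full; the proofs are below) =====
def Claim_equal_allocation_py : Prop := ∀ (total : Int) (configs : List String), Dom_allocation_py total configs → Pre_allocation_py total configs → Spec_allocation_py total configs (allocation_py total configs)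

-- ===== LEMMAS AND PROOFS =====

-- The i-th share of B's greedy loop equals A's base + (1 if i < rem else 0):
-- invariant remaining = base*left + max (rem - i) 0, left = names.length.
lemma allocBLoop_eq_fold (base rem : Int) :
    ∀ (names : List String) (i : Int) (d : PySem.Dict String Int),
      rem ≤ i + (names.length : Int) →
      allocBLoop (base * (names.length : Int) + max (rem - i) 0) (names.length : Int) names d
        = (PySem.List.enumerate names i).foldl
            (fun d p => d.insert p.2 (base + (if p.1 < rem then 1 else 0))) d := by
  intro names
  induction names with
  | nil => intro i d _; simp [allocBLoop, PySem.List.enumerate]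
  | cons n rest ih =>
    intro i d hle
    have hLlen : ((n :: rest).length : Int) = (rest.length : Int) + 1 := by
      push_cast [List.length_cons]; ring
    set L : Int := (rest.length : Int) with hL
    have hLpos : 0 < L + 1 := by positivity
    have hshare : -(PySem.Int.floordiv (-(base * (L + 1) + max (rem - i) 0)) (L + 1))
        = base + (if i < rem then 1 else 0) := by
      rw [PySem.Int.neg_floordiv_neg_eq_iff_of_pos hLpos]
      by_cases h : i < rem
      · have hmax : max (rem - i) 0 = rem - i := by omega
        have hub : rem - i ≤ L + 1 := by
          have := hle; rw [hLlen] at this; omega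
        simp only [h, if_true, hmax]
        constructor <;> nlinarith
      · have hmax : max (rem - i) 0 = 0 := by omega
        simp only [h, if_false, hmax]
        constructor <;> nlinarith
    rw [PySem.List.enumerate_cons, List.foldl_cons]
    rw [hLlen]
    simp only [allocBLoop, hshare]
    have hrem' : base * (L + 1) + max (rem - i) 0 - (base + (if i < rem then 1 else 0))
        = base * L + max (rem - (i + 1)) 0 := by
      by_cases h : i < rem
      · simp only [h, if_true]
        have h1 : max (rem - i) 0 = rem - i := by omega
        have h2 : max (rem - (i + 1)) 0 = rem - (i + 1) := by omega
        rw [h1, h2]; ring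
      · simp only [h, if_false]
        have h1 : max (rem - i) 0 = 0 := by omega
        have h2 : max (rem - (i + 1)) 0 = 0 := by omega
        rw [h1, h2]; ring
    rw [hrem']
    have hle' : rem ≤ (i + 1) + (rest.length : Int) := by
      rw [hLlen] at hle; omega
    have := ih (i + 1) (d.insert n (base + (if i < rem then 1 else 0))) hle'
    simpa using this

-- ===== VERDICT (by name: the statement is the Claim_ definition above) =====
theorem allocation_py_spec : Claim_equal_allocation_py := by
  intro total configs _ hpre
  obtain ⟨htot, hne⟩ := hpre
  unfold Spec_allocation_py allocation_py allocation_py_alt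
  have hn : 0 < (configs.length : Int) := by
    have : configs.length ≠ 0 := by simpa [List.length_eq_zero_iff] using hne
    omega
  set n : Int := (configs.length : Int)
  set base := PySem.Int.floordiv total n with hbase
  set rem := PySem.Int.mod total n with hrem
  have hmod : rem = total % n := by rw [hrem, PySem.Int.mod_eq_emod_of_pos hn]
  have hrnn : 0 ≤ rem := by rw [hmod]; exact Int.emod_nonneg _ (by omega)
  have hrlt : rem < n := by rw [hmod]; exact Int.emod_lt_of_pos _ hn
  have hdecomp : total = base * n + rem := by
    have := PySem.Int.floordiv_mul_add_mod total n
    rw [← hbase, ← hrem] at this; omega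
  have hkey := allocBLoop_eq_fold base rem configs 0 PySem.Dict.empty (by omega)
  have htotal : base * n + max (rem - 0) 0 = total := by
    have : max (rem - 0) 0 = rem := by omega
    omega
  rw [htotal] at hkey
  rw [hkey]
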